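-- pv_equiv track=rewrite | github.com/TetianaMir/Hillel | lesson_6_hw_1/Task_5.py | some_function
-- ===== SOURCE A (Python) =====
-- SIZE_OF_CHESS_BOARD = 8
--
-- def some_function(count_of_seed):
--     ord_list = []
--     values_list = [0, 1, 2, 3, 4, 5, 6, 7]
--     for i in range(ord('a'), ord('h') + 1):
--         ord_list.append(i)
--
--     counter = 0
--     while count_of_seed // 2:
--         count_of_seed //= 2
--         counter += 1
--
--     int_value = counter // SIZE_OF_CHESS_BOARD
--     additional_value = counter % SIZE_OF_CHESS_BOARD
--     if counter % SIZE_OF_CHESS_BOARD == 0: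
--         return chr(ord_list[additional_value - 1]) + str(values_list[int_value])
--     else:
--         return chr(ord_list[additional_value - 1]) + str(values_list[int_value + 1])
-- ===== SOURCE B (Python) =====
-- SIZE_OF_CHESS_BOARD = 8
--
-- def some_function(count_of_seed):
--     counter = max(0, count_of_seed.bit_length() - 1)
--     row, col = divmod(counter, SIZE_OF_CHESS_BOARD)
--     letter = chr(ord('a') + (col - 1) % SIZE_OF_CHESS_BOARD)
--     return letter + str(row if col == 0 else row + 1)
-- ===== Notes on version B (the rewrite author's own statement) =====
-- stated objective: simpler
-- what changed: Replaces the halving while-loop with a closed-form integer logarithm via int.bit_length (clamped at 0) and folds the two return branches into one chr/str expression.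
-- outside the precondition, e.g. on some_function(-1): A does not finish within the time limit, B returns 'h0'
import Mathlib
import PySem

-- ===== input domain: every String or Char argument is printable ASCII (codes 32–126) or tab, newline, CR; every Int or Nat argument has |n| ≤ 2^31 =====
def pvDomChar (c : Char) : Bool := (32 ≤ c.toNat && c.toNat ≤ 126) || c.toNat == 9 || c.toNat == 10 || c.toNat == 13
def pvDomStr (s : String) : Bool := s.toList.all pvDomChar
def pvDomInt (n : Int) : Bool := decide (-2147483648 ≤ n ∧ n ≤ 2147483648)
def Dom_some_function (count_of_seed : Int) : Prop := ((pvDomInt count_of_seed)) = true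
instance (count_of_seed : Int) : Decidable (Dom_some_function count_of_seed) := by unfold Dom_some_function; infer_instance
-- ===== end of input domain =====

-- B replaces A's halving while-loop by a closed-form bit_length-based logarithm (objective: simpler).

-- ===== PORT A =====
-- A's while loop 'while count_of_seed // 2: count_of_seed //= 2; counter += 1'.
-- For count_of_seed < 0 the Python loop never terminates (Pre_ excludes those inputs),
-- so the loop is ported as a structural recursion on the nonnegative value (as a Nat).
def someFunctionLoop (n : Nat) (counter : Nat) : Nat :=
  if n / 2 = 0 then counter else someFunctionLoop (n / 2) (counter + 1)
termination_by n
decreasing_by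
  have h2 : 2 ≤ n := by omega
  exact Nat.div_lt_self (by omega) (by omega)

def some_function (count_of_seed : Int) : String :=
  let ord_list : List Int := PySem.List.pyRange 97 105 1   -- range(ord('a'), ord('h')+1) appended one by one
  let values_list : List Int := [0, 1, 2, 3, 4, 5, 6, 7]
  let counter : Int := (someFunctionLoop count_of_seed.toNat 0 : Nat)
  let int_value : Int := PySem.Int.floordiv counter 8
  let additional_value : Int := PySem.Int.mod counter 8
  -- list indexing never goes out of range here, so the IndexError branch (none) gets a dummy default
  if PySem.Int.mod counter 8 = 0 then
    (Char.ofNat ((PySem.List.pyGet? ord_list (additional_value - 1)).getD 0).toNat).toString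
      ++ PySem.Int.toStr ((PySem.List.pyGet? values_list int_value).getD 0)
  else
    (Char.ofNat ((PySem.List.pyGet? ord_list (additional_value - 1)).getD 0).toNat).toString
      ++ PySem.Int.toStr ((PySem.List.pyGet? values_list (int_value + 1)).getD 0)

-- ===== PORT B =====
-- int.bit_length() for a nonnegative int is Nat.size (Pre_ restricts to nonnegative inputs)
def some_function_alt (count_of_seed : Int) : String :=
  let counter : Int := max 0 ((count_of_seed.toNat.size : Int) - 1)
  let row : Int := PySem.Int.floordiv counter 8
  let col : Int := PySem.Int.mod counter 8
  let letter : Char := Char.ofNat (97 + (PySem.Int.mod (col - 1) 8)).toNat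
  letter.toString ++ PySem.Int.toStr (if col = 0 then row else row + 1)

-- ===== PRECONDITION & SPEC =====
-- Pre_ excludes negative inputs: there A's while loop never terminates (count_of_seed // 2 stays -1).
def Pre_some_function (count_of_seed : Int) : Prop := 0 ≤ count_of_seed
instance (count_of_seed : Int) : Decidable (Pre_some_function count_of_seed) := by unfold Pre_some_function; infer_instance
def pvWitness_some_function : Int := (5)

def Spec_some_function (count_of_seed : Int) (out : String) : Prop := out = some_function_alt count_of_seed
instance (count_of_seed : Int) (out : String) : Decidable (Spec_some_function count_of_seed out) := by unfold Spec_some_function; infer_instance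

-- ===== CLAIM (what is proved, stated in full; the proofs are below) =====
def Claim_equal_some_function : Prop := ∀ (count_of_seed : Int), Dom_some_function count_of_seed → Pre_some_function count_of_seed → Spec_some_function count_of_seed (some_function count_of_seed)

-- ===== LEMMAS AND PROOFS =====

-- A's loop computes the integer base-2 logarithm (0 at 0 and 1), i.e. Nat.log2.
theorem someFunctionLoop_eq (n c : Nat) : someFunctionLoop n c = c + Nat.log2 n := by
  induction n using Nat.strong_induction_on generalizing c with
  | _ n ih =>
    rw [someFunctionLoop]
    conv_rhs => rw [Nat.log2_def]
    by_cases h : n / 2 = 0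
    · have h1 : ¬ 2 ≤ n := by omega
      simp [h, h1]
    · have h2 : 2 ≤ n := by omega
      have hlt : n / 2 < n := Nat.div_lt_self (by omega) (by omega)
      simp [h, h2, ih _ hlt]
      omega

-- B's clamped (bit_length - 1) is the same integer logarithm.
theorem size_sub_one_eq_log2 (m : Nat) : max 0 ((m.size : Int) - 1) = (Nat.log2 m : Int) := by
  rcases Nat.eq_zero_or_pos m with h | h
  · subst h; simp [Nat.size_zero]
  · have h1 : m.size ≤ m.log2 + 1 := Nat.size_le.mpr (Nat.lt_log2_self)
    have h2 : m.log2 < m.size := Nat.lt_size.mpr (Nat.log2_self_le (by omega))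
    omega

-- both output expressions agree for every counter value up to 31
theorem formats_eq : ∀ k < 32,
    (let counter : Int := (k : Nat);
     let int_value : Int := PySem.Int.floordiv counter 8
     let additional_value : Int := PySem.Int.mod counter 8
     if PySem.Int.mod counter 8 = 0 then
       (Char.ofNat ((PySem.List.pyGet? (PySem.List.pyRange 97 105 1) (additional_value - 1)).getD 0).toNat).toString
         ++ PySem.Int.toStr ((PySem.List.pyGet? ([0,1,2,3,4,5,6,7] : List Int) int_value).getD 0)
     else
       (Char.ofNat ((PySem.List.pyGet? (PySem.List.pyRange 97 105 1) (additional_value - 1)).getD 0).toNat).toString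
         ++ PySem.Int.toStr ((PySem.List.pyGet? ([0,1,2,3,4,5,6,7] : List Int) (int_value + 1)).getD 0))
    =
    (let counter : Int := (k : Nat);
     let row : Int := PySem.Int.floordiv counter 8
     let col : Int := PySem.Int.mod counter 8
     let letter : Char := Char.ofNat (97 + (PySem.Int.mod (col - 1) 8)).toNat
     letter.toString ++ PySem.Int.toStr (if col = 0 then row else row + 1)) := by
  decide

theorem log2_lt_32 (m : Nat) (h : m ≤ 2147483648) : Nat.log2 m < 32 := by
  rcases Nat.eq_zero_or_pos m with h0 | h0
  · simp [h0, Nat.log2]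
  · exact (Nat.log2_lt (by omega)).mpr (by omega)

-- ===== VERDICT (by name: the statement is the Claim_ definition above) =====
theorem some_function_spec : Claim_equal_some_function := by
  intro n hdom hpre
  unfold Spec_some_function some_function some_function_alt
  rw [someFunctionLoop_eq, size_sub_one_eq_log2]
  simp only [Nat.zero_add]
  have hdom' : -2147483648 ≤ n ∧ n ≤ 2147483648 := by
    simpa [Dom_some_function, pvDomInt] using hdom
  have hb : n.toNat ≤ 2147483648 := by omega
  exact formats_eq _ (log2_lt_32 _ hb)
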